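-- pv_equiv track=rewrite | github.com/mistmake/HSE_vibe_hack | study_analysis/preprocess.py | _propagate_header_cell
-- ===== SOURCE A (Python) =====
-- def _propagate_header_cell(rows: list[list[str]], row_index: int, column_index: int) -> str:
--     for candidate_index in range(column_index - 1, -1, -1):
--         if candidate_index >= len(rows[row_index]):
--             continue
--         candidate = str(rows[row_index][candidate_index]).strip()
--         if not candidate:
--             continue
--         has_lower_fragment = any(
--             row_index + 1 < len(rows)
--             and column_index < len(rows[lower_row_index])
--             and str(rows[lower_row_index][column_index]).strip()
--             for lower_row_index in range(row_index + 1, min(len(rows), row_index + 3))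
--         )
--         if has_lower_fragment:
--             return candidate
--         break
--     return ""
-- ===== SOURCE B (Python) =====
-- def _propagate_header_cell(rows: list[list[str]], row_index: int, column_index: int) -> str:
--     # Decide the lower-fragment condition first; if it fails, every answer is "".
--     # Only then materialise the left prefix declaratively: slice, strip, drop empties,
--     # and take the last survivor (= the nearest non-empty cell left of the column).
--     if column_index <= 0:
--         return ""
--     has_lower_fragment = any(
--         str(rows[r][column_index]).strip()
--         for r in range(row_index + 1, min(len(rows), row_index + 3))
--         if row_index + 1 < len(rows) and column_index < len(rows[r])
--     )
--     if not has_lower_fragment: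
--         return ""
--     nonempty = [c for c in (str(cell).strip() for cell in rows[row_index][:column_index]) if c]
--     return nonempty[-1] if nonempty else ""
-- ===== Notes on version B (the rewrite author's own statement) =====
-- stated objective: alternative
-- what changed: Inverts the control flow: decides the lower-fragment condition up front (returning '' immediately when it fails) and then obtains the candidate declaratively as the last element of the slice-strip-filter pipeline over the row prefix, instead of A's index loop with continue/break that searches a candidate first and only then tests the fragment condition.
import Mathlib
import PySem

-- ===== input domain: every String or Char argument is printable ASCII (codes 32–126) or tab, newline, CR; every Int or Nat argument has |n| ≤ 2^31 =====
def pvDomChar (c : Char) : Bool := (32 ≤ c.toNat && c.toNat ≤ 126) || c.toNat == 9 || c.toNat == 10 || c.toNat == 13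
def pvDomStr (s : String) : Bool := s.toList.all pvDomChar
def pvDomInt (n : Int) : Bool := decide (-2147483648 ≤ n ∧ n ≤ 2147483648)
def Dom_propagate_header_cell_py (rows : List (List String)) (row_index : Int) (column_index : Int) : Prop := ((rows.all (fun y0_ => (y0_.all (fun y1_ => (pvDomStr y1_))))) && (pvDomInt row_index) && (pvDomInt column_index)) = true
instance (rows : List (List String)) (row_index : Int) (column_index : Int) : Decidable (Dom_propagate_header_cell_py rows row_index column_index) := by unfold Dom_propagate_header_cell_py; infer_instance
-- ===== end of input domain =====

-- B inverts A's control flow: it decides the lower-fragment condition first and then takes the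
-- candidate as the last element of a slice/strip/filter pipeline, instead of A's early-breaking
-- backward index loop that tests the fragment condition only after finding a candidate
-- (objective: alternative).

-- ===== PORT A =====
-- A's `any(...)` generator expression, condition folded into the predicate as in the source
def pvAnyLowerFragment (rows : List (List String)) (row_index : Int) (column_index : Int) : Bool :=
  (PySem.List.pyRange (row_index + 1) (min (rows.length : Int) (row_index + 3)) 1).any
    (fun lower_row_index =>
      decide (row_index + 1 < (rows.length : Int)) &&
      decide (column_index < (((PySem.List.pyGet? rows lower_row_index).getD []).length : Int)) &&
      !(PySem.Str.strip ((PySem.List.pyGet? ((PySem.List.pyGet? rows lower_row_index).getD []) column_index).getD "") == ""))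

-- A's for-loop with `continue`/`break`/`return`, as structural recursion over the index list
def pvALoop (rows : List (List String)) (row_index : Int) (column_index : Int) : List Int → String
  | [] => ""
  | candidate_index :: rest =>
      let row := (PySem.List.pyGet? rows row_index).getD []
      if (row.length : Int) ≤ candidate_index then
        pvALoop rows row_index column_index rest
      else
        let candidate := PySem.Str.strip ((PySem.List.pyGet? row candidate_index).getD "")
        if candidate = "" then
          pvALoop rows row_index column_index rest
        else if pvAnyLowerFragment rows row_index column_index then candidate
        else ""

def propagate_header_cell_py (rows : List (List String)) (row_index : Int) (column_index : Int) : String :=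
  pvALoop rows row_index column_index (PySem.List.pyRange (column_index - 1) (-1) (-1))

-- ===== PORT B =====
-- B's `any(... for r in range(...) if cond)`: filter by the condition, map to the value, any
def pvBFrag (rows : List (List String)) (row_index : Int) (column_index : Int) : Bool :=
  (((PySem.List.pyRange (row_index + 1) (min (rows.length : Int) (row_index + 3)) 1).filter
      (fun r =>
        decide (row_index + 1 < (rows.length : Int)) &&
        decide (column_index < (((PySem.List.pyGet? rows r).getD []).length : Int)))).map
    (fun r => PySem.Str.strip ((PySem.List.pyGet? ((PySem.List.pyGet? rows r).getD []) column_index).getD ""))).any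
    (fun s => !(s == ""))

def propagate_header_cell_py_alt (rows : List (List String)) (row_index : Int) (column_index : Int) : String :=
  if column_index ≤ 0 then ""
  else if !(pvBFrag rows row_index column_index) then ""
  else
    let nonempty :=
      ((PySem.List.slice ((PySem.List.pyGet? rows row_index).getD []) none (some column_index)).map
        PySem.Str.strip).filter (fun c => !(c == ""))
    match nonempty.getLast? with
    | some c => c
    | none => ""

-- ===== PRECONDITION & SPEC =====
-- Pre_ excludes exactly the inputs where Python A raises IndexError: the loop body runs
-- (column_index ≥ 1) while rows[row_index] is out of range.
def Pre_propagate_header_cell_py (rows : List (List String)) (row_index : Int) (column_index : Int) : Prop :=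
  column_index ≤ 0 ∨ PySem.Raise.InRange rows.length row_index
instance (rows : List (List String)) (row_index : Int) (column_index : Int) : Decidable (Pre_propagate_header_cell_py rows row_index column_index) := by unfold Pre_propagate_header_cell_py; infer_instance

def pvWitness_propagate_header_cell_py : List (List String) × Int × Int :=
  ([["h", ""], ["", "x"]], 0, 1)

def Spec_propagate_header_cell_py (rows : List (List String)) (row_index : Int) (column_index : Int) (out : String) : Prop := out = propagate_header_cell_py_alt rows row_index column_index
instance (rows : List (List String)) (row_index : Int) (column_index : Int) (out : String) : Decidable (Spec_propagate_header_cell_py rows row_index column_index out) := by unfold Spec_propagate_header_cell_py; infer_instance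

-- ===== CLAIM (what is proved, stated in full; the proofs are below) =====
def Claim_equal_propagate_header_cell_py : Prop := ∀ (rows : List (List String)) (row_index : Int) (column_index : Int), Dom_propagate_header_cell_py rows row_index column_index → Pre_propagate_header_cell_py rows row_index column_index → Spec_propagate_header_cell_py rows row_index column_index (propagate_header_cell_py rows row_index column_index)

-- ===== LEMMAS AND PROOFS =====

-- the two `any` renderings of the lower-fragment condition agree
theorem pvBFrag_eq (rows : List (List String)) (row_index column_index : Int) :
    pvBFrag rows row_index column_index = pvAnyLowerFragment rows row_index column_index := by
  unfold pvBFrag pvAnyLowerFragment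
  induction PySem.List.pyRange (row_index + 1) (min (rows.length : Int) (row_index + 3)) 1 with
  | nil => rfl
  | cons r rest ih =>
      simp only [List.filter_cons, List.any_cons]
      split_ifs with h
      · simp only [List.map_cons, List.any_cons, ih, h, Bool.true_and]
      · simp only [ih]
        rw [show (decide (row_index + 1 < (rows.length : Int)) &&
              decide (column_index < (((PySem.List.pyGet? rows r).getD []).length : Int))) = false by
            simpa using h]
        simp

-- when the fragment condition fails, A's loop returns "" on any index list
theorem pvALoop_of_not_frag (rows : List (List String)) (row_index column_index : Int)
    (h : pvAnyLowerFragment rows row_index column_index = false) :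
    ∀ l : List Int, pvALoop rows row_index column_index l = "" := by
  intro l
  induction l with
  | nil => rfl
  | cons i rest ih =>
      simp only [pvALoop, h, Bool.false_eq_true, if_false]
      split_ifs <;> first | rfl | exact ih


-- when it holds, A's loop returns the first "good" index's stripped cell;
-- an out-of-range index contributes "" (strip of the default), so it is skipped either way
theorem pvALoop_of_frag (rows : List (List String)) (row_index column_index : Int)
    (h : pvAnyLowerFragment rows row_index column_index = true)
    (l : List Int) (hl : ∀ i ∈ l, 0 ≤ i) :
    pvALoop rows row_index column_index l =
      ((l.map (fun i =>
          if (((PySem.List.pyGet? rows row_index).getD []).length : Int) ≤ i then ""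
          else PySem.Str.strip
            ((PySem.List.pyGet? ((PySem.List.pyGet? rows row_index).getD []) i).getD ""))).filter
        (fun c => !(c == ""))).head?.getD "" := by
  induction l with
  | nil => rfl
  | cons i rest ih =>
      have hrest : ∀ j ∈ rest, 0 ≤ j := fun j hj => hl j (List.mem_cons_of_mem _ hj)
      by_cases hb : (((PySem.List.pyGet? rows row_index).getD []).length : Int) ≤ i
      · simp [pvALoop, hb, ih hrest]
      · by_cases he : PySem.Str.strip
            ((PySem.List.pyGet? ((PySem.List.pyGet? rows row_index).getD []) i).getD "") = ""
        · simp [pvALoop, hb, he, ih hrest]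
        · simp [pvALoop, hb, he, h]

-- the mapped index pipeline over range [0, n) equals the stripped prefix (plus skipped blanks)
theorem pipeline_eq (row : List String) (n : Nat) :
    (((List.range n).map (fun k : Nat =>
        if ((row.length : Int) ≤ (k : Int)) then ""
        else PySem.Str.strip ((PySem.List.pyGet? row (k : Int)).getD ""))).filter
      (fun c => !(c == ""))) =
    ((row.take n).map PySem.Str.strip).filter (fun c => !(c == "")) := by
  induction n with
  | zero => simp
  | succ m ih =>
      rw [List.range_succ, List.map_append, List.filter_append, ih]
      by_cases hm : m < row.length
      · rw [List.take_add_one, List.getElem?_eq_getElem hm]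
        simp
        rw [show (List.map PySem.Str.strip row).take (m + 1)
              = (List.map PySem.Str.strip row).take m ++ [PySem.Str.strip row[m]] from by
            have hm' : m < (List.map PySem.Str.strip row).length := by simpa using hm
            rw [List.take_add_one, List.getElem?_eq_getElem hm']
            simp,
          List.filter_append]
        simp [Nat.not_le.mpr hm, List.getElem?_eq_getElem hm]
      · have h1 : ((row.length : Int) ≤ (m : Int)) := by exact_mod_cast Nat.not_lt.mp hm
        have htake : row.take (m + 1) = row.take m := by
          rw [List.take_add_one, List.getElem?_eq_none (Nat.not_lt.mp hm)]
          simp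
        rw [htake]
        simp
        intro hlt
        exact absurd hlt hm

-- ===== VERDICT (by name: the statement is the Claim_ definition above) =====
theorem propagate_header_cell_py_spec : Claim_equal_propagate_header_cell_py := by
  intro rows row_index column_index _ _
  unfold Spec_propagate_header_cell_py propagate_header_cell_py propagate_header_cell_py_alt
  by_cases hc : column_index ≤ 0
  · rw [if_pos hc, PySem.List.pyRange_neg_one_eq_reverse,
      PySem.List.pyRange_one_eq_nil (by omega)]
    rfl
  · rw [if_neg hc, pvBFrag_eq]
    by_cases hf : pvAnyLowerFragment rows row_index column_index
    · rw [hf]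
      simp only [Bool.not_true, Bool.false_eq_true, if_false]
      rw [PySem.List.pyRange_neg_one_eq_reverse]
      norm_num only
      rw [pvALoop_of_frag rows row_index column_index hf _
          (by intro i hi
              rw [List.mem_reverse, PySem.List.mem_pyRange_one] at hi
              exact hi.1)]
      rw [List.map_reverse, List.filter_reverse, List.head?_reverse]
      rw [PySem.List.pyRange_one, show column_index - 1 + 1 - 0 = column_index from by ring, List.map_map]
      have hfun : ((fun i : Int =>
            if (((PySem.List.pyGet? rows row_index).getD []).length : Int) ≤ i then ""
            else PySem.Str.strip
              ((PySem.List.pyGet? ((PySem.List.pyGet? rows row_index).getD []) i).getD "")) ∘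
          (fun k : Nat => (0 : Int) + (k : Int)))
          = (fun k : Nat =>
            if ((((PySem.List.pyGet? rows row_index).getD []).length : Int) ≤ (k : Int)) then ""
            else PySem.Str.strip
              ((PySem.List.pyGet? ((PySem.List.pyGet? rows row_index).getD []) (k : Int)).getD "")) := by
        funext k
        norm_num
      rw [hfun]
      have hslice : PySem.List.slice ((PySem.List.pyGet? rows row_index).getD []) none
          (some column_index) = ((PySem.List.pyGet? rows row_index).getD []).take column_index.toNat :=
        PySem.List.slice_to _ (by omega)
      rw [hslice]
      have := pipeline_eq ((PySem.List.pyGet? rows row_index).getD []) column_index.toNat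
      rw [this]
      cases h : (((((PySem.List.pyGet? rows row_index).getD []).take column_index.toNat).map
          PySem.Str.strip).filter (fun c => !(c == ""))).getLast? <;> rfl
    · simp only [Bool.not_eq_true] at hf
      rw [hf]
      simp only [Bool.not_false, if_true]
      exact pvALoop_of_not_frag rows row_index column_index hf _
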